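-- pv_equiv track=rewrite | github.com/wagenadl/qplot | pyqplot/utils.py | schmitt
-- ===== SOURCE A (Python) =====
-- def schmitt(xx):
--     N = len(xx)
--     iup = []
--     idn = []
--     state = False
--     for n in range(N):
--         if state:
--             if not(xx[n]):
--                 idn.append(n)
--                 state = False
--         else:
--              if xx[n]:
--                  iup.append(n)
--                  state = True
--     if state:
--         idn.append(N)
--     return (iup, idn)
-- ===== SOURCE B (Python) =====
-- from itertools import groupby
--
-- def schmitt(xx):
--     N = len(xx)
--     iup = []
--     idn = []
--     idx = 0
--     for key, grp in groupby(xx, key=bool):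
--         length = sum(1 for _ in grp)
--         if key:
--             iup.append(idx)
--             idn.append(idx + length)
--         idx += length
--     return (iup, idn)
-- ===== Notes on version B (the rewrite author's own statement) =====
-- stated objective: idiomatic
-- what changed: Replaced the per-element boolean state machine with a run-length decomposition via itertools.groupby: each truthy run contributes its start index to iup and its end index (first following falsy index, or N) to idn.
import Mathlib
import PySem

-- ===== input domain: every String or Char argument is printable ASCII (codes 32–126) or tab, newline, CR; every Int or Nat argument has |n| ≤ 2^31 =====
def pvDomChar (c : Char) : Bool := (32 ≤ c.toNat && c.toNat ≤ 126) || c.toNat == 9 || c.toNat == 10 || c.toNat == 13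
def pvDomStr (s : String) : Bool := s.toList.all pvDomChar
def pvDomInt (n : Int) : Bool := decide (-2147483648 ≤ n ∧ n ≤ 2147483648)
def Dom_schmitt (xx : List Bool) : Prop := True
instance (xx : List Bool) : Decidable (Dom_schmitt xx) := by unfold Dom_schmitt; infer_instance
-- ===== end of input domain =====

-- B replaces A's per-element boolean state machine by a run-length (groupby) decomposition; objective: idiomatic.

-- ===== PORT A =====
-- one loop step: state machine over (iup, idn, state), n = current index, x = xx[n]
def schmittStep (st : List Int × List Int × Bool) (p : Int × Bool) : List Int × List Int × Bool :=
  let iup := st.1; let idn := st.2.1; let state := st.2.2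
  let n := p.1; let x := p.2
  if state then
    if !x then (iup, idn ++ [n], false) else st
  else
    if x then (iup ++ [n], idn, true) else st

def schmitt (xx : List Bool) : List Int × List Int :=
  let N : Int := xx.length
  let r := (PySem.List.enumerate xx 0).foldl schmittStep ([], [], false)
  if r.2.2 then (r.1, r.2.1 ++ [N]) else (r.1, r.2.1)

-- ===== PORT B =====
-- per-group loop of Source B: first element of the group plus its takeWhile-run is the group, idx advances by its length
def schmitt_alt_go : List Bool → Int → List Int × List Int
  | [], _ => ([], [])
  | b :: rest, idx =>
    let run := rest.takeWhile (· == b)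
    let rest' := rest.dropWhile (· == b)
    let len : Int := 1 + run.length
    let r := schmitt_alt_go rest' (idx + len)
    if b then (idx :: r.1, (idx + len) :: r.2) else r
termination_by l _ => l.length
decreasing_by
  exact Nat.lt_succ_of_le (List.Sublist.length_le (List.dropWhile_sublist _))

def schmitt_alt (xx : List Bool) : List Int × List Int :=
  schmitt_alt_go xx 0

-- ===== PRECONDITION & SPEC =====
def Spec_schmitt (xx : List Bool) (out : List Int × List Int) : Prop := out = schmitt_alt xx
instance (xx : List Bool) (out : List Int × List Int) : Decidable (Spec_schmitt xx out) := by unfold Spec_schmitt; infer_instance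

-- ===== CLAIM (what is proved, stated in full; the proofs are below) =====
def Claim_equal_schmitt : Prop := ∀ (xx : List Bool), Dom_schmitt xx → Spec_schmitt xx (schmitt xx)

-- ===== LEMMAS AND PROOFS =====

-- one-element-at-a-time versions of the run-based recursion (mutual state machine)
mutual
def gof : List Bool → Int → List Int × List Int
  | [], _ => ([], [])
  | false :: rest, s => gof rest (s + 1)
  | true :: rest, s =>
    let r := goT rest (s + 1)
    (s :: r.1, r.2)
def goT : List Bool → Int → List Int × List Int
  | [], s => ([], [s])
  | true :: rest, s => goT rest (s + 1)
  | false :: rest, s =>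
    let r := gof rest (s + 1)
    (r.1, s :: r.2)
end

def fin (r : List Int × List Int × Bool) (N : Int) : List Int × List Int :=
  if r.2.2 then (r.1, r.2.1 ++ [N]) else (r.1, r.2.1)

lemma go_cons (b : Bool) (rest : List Bool) (idx : Int) :
    schmitt_alt_go (b :: rest) idx =
      (let run := rest.takeWhile (· == b)
       let rest' := rest.dropWhile (· == b)
       let len : Int := 1 + run.length
       let r := schmitt_alt_go rest' (idx + len)
       if b then (idx :: r.1, (idx + len) :: r.2) else r) := by
  rw [schmitt_alt_go]

-- skipping a false-run does not change the run-based result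
lemma go_skipF (l : List Bool) (s : Int) :
    schmitt_alt_go (l.dropWhile (· == false)) (s + ((l.takeWhile (· == false)).length : Int))
      = schmitt_alt_go l s := by
  cases l with
  | nil => simp
  | cons b l' =>
    cases b with
    | false =>
      rw [go_cons]
      simp only [List.dropWhile_cons, List.takeWhile_cons, beq_self_eq_true, if_true,
        List.length_cons, Bool.false_eq_true, if_false]
      push_cast
      ring_nf
    | true =>
      simp

-- the run-based recursion equals the element-wise state machine
lemma go_eq_gof (l : List Bool) : (∀ s, schmitt_alt_go l s = gof l s) ∧
    (∀ s, goT l s =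
      ((schmitt_alt_go (l.dropWhile (· == true)) (s + ((l.takeWhile (· == true)).length : Int))).1,
       (s + ((l.takeWhile (· == true)).length : Int)) ::
         (schmitt_alt_go (l.dropWhile (· == true)) (s + ((l.takeWhile (· == true)).length : Int))).2)) := by
  induction l with
  | nil => constructor <;> intro s <;> simp [schmitt_alt_go, gof, goT]
  | cons b l' ih =>
    obtain ⟨ih1, ih2⟩ := ih
    constructor <;> intro s
    · cases b with
      | false =>
        rw [go_cons]
        simp only [gof, Bool.false_eq_true, if_false]
        rw [show s + (1 + ((l'.takeWhile (· == false)).length : Int)) =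
              (s + 1) + ((l'.takeWhile (· == false)).length : Int) by ring]
        rw [go_skipF l' (s + 1), ih1]
      | true =>
        rw [go_cons]
        simp only [gof, if_true, ih2 (s + 1)]
        rw [show s + 1 + ((l'.takeWhile (· == true)).length : Int) =
              s + (1 + ((l'.takeWhile (· == true)).length : Int)) by ring]
    · cases b with
      | true =>
        simp only [goT, List.dropWhile_cons, List.takeWhile_cons, beq_self_eq_true, if_true,
          List.length_cons, ih2 (s + 1)]
        rw [show s + 1 + ((l'.takeWhile (· == true)).length : Int) =
              s + (((l'.takeWhile (· == true)).length : Nat) + 1 : Nat) by push_cast; ring]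
      | false =>
        rw [List.dropWhile_cons_of_neg (by simp), List.takeWhile_cons_of_neg (by simp)]
        simp only [goT, List.length_nil, Nat.cast_zero, add_zero]
        rw [go_cons]
        simp only [Bool.false_eq_true, if_false]
        rw [show s + (1 + ((l'.takeWhile (· == false)).length : Int)) =
              (s + 1) + ((l'.takeWhile (· == false)).length : Int) by ring]
        rw [go_skipF l' (s + 1), ih1]

-- A's fold, finalized, appends exactly gof/goT to the accumulators
lemma fold_spec (xx : List Bool) : ∀ (s : Int) (iup idn : List Int),
    fin ((PySem.List.enumerate xx s).foldl schmittStep (iup, idn, false)) (s + xx.length)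
      = (iup ++ (gof xx s).1, idn ++ (gof xx s).2) ∧
    fin ((PySem.List.enumerate xx s).foldl schmittStep (iup, idn, true)) (s + xx.length)
      = (iup ++ (goT xx s).1, idn ++ (goT xx s).2) := by
  induction xx with
  | nil => intro s iup idn; simp [PySem.List.enumerate, fin, gof, goT]
  | cons b rest ih =>
    intro s iup idn
    constructor
    · cases b with
      | false =>
        simp only [PySem.List.enumerate_cons, List.foldl_cons, schmittStep, gof]
        norm_num
        have := (ih (s + 1) iup idn).1
        rw [show s + ((rest.length : Int) + 1) = (s + 1) + rest.length by ring]
        exact this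
      | true =>
        simp only [PySem.List.enumerate_cons, List.foldl_cons, schmittStep, gof]
        norm_num
        have := (ih (s + 1) (iup ++ [s]) idn).2
        rw [show s + ((rest.length : Int) + 1) = (s + 1) + rest.length by ring]
        rw [this]
        simp
    · cases b with
      | true =>
        simp only [PySem.List.enumerate_cons, List.foldl_cons, schmittStep, goT]
        norm_num
        have := (ih (s + 1) iup idn).2
        rw [show s + ((rest.length : Int) + 1) = (s + 1) + rest.length by ring]
        exact this
      | false =>
        simp only [PySem.List.enumerate_cons, List.foldl_cons, schmittStep, goT]
        norm_num
        have := (ih (s + 1) iup (idn ++ [s])).1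
        rw [show s + ((rest.length : Int) + 1) = (s + 1) + rest.length by ring]
        rw [this]
        simp

-- ===== VERDICT (by name: the statement is the Claim_ definition above) =====
theorem schmitt_spec : Claim_equal_schmitt := by
  intro xx _
  unfold Spec_schmitt schmitt schmitt_alt
  have h := (fold_spec xx 0 [] []).1
  simp only [zero_add] at h
  show fin ((PySem.List.enumerate xx 0).foldl schmittStep ([], [], false)) (xx.length : Int)
      = schmitt_alt_go xx 0
  rw [h, (go_eq_gof xx).1 0]
  simp
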